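-- pv_equiv track=rewrite | github.com/realnumber666/Cracking-the-Coding-Interview | Python/360One.py | string2int
-- ===== SOURCE A (Python) =====
-- def  string2int(str):
--     flag = 0
--     if (len(str) == 0):
--         return 0
--     ret = 0
--     if (len(str) == 1 and str[0] == '0'):
--         return 0
--     if (str[0] == '.'):
--         return 0
--     for i in range(len(str)):
--         if (str[i] == '.'):
--             flag = 1
--             continue
--         k = char2int(str[i])
--         if (k == 'f'):
--             return 0
--         elif (flag == 0):
--             ret = ret * 10 + k
--         else:
--             ret = ret
--     return ret
--
-- def char2int(char):
--     if (char == '0' or char == '1' or char == '2' or char == '3' or char == '4' or char == '5' or char == '6' or char == '7' or char == '8' or char == '9'):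
--         return int(char)
--     else:
--         return 'f'
-- ===== SOURCE B (Python) =====
-- def string2int(str):
--     if not str or str[0] == '.':
--         return 0
--     if any(c not in '0123456789.' for c in str):
--         return 0
--     value = 0
--     for c in str.split('.', 1)[0]:
--         value = 10 * value + (ord(c) - 48)
--     return value
-- ===== Notes on version B (the rewrite author's own statement) =====
-- stated objective: simpler
-- what changed: Replaces A's single-pass state machine (flag toggled at the first dot, per-character char2int with an 'f' sentinel and mid-loop early returns) by a validate-then-split shape: reject any character that is neither a decimal digit nor a dot, then convert only the substring before the first dot.
import Mathlib
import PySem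

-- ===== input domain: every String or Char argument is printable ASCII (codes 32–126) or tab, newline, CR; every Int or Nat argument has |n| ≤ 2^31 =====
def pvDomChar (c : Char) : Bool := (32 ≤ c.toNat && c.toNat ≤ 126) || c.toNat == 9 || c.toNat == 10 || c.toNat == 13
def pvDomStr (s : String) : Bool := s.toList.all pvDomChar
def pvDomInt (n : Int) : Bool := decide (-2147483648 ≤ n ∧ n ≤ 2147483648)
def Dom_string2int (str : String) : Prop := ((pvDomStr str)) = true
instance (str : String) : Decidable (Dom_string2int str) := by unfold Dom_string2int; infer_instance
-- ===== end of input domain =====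

-- B replaces A's single-pass flag/sentinel state machine by validate-then-split-then-convert; objective: simpler.

-- ===== PORT A =====
-- char2int: returns the digit's value, or none for Python's string sentinel 'f'
def char2intA (c : Char) : Option Int :=
  if c = '0' ∨ c = '1' ∨ c = '2' ∨ c = '3' ∨ c = '4' ∨ c = '5' ∨ c = '6' ∨ c = '7' ∨ c = '8' ∨ c = '9'
  then some ((c.toNat : Int) - 48)   -- int(char) on a single digit character
  else none

-- the 'for i in range(len(str))' loop with its (flag, ret) state and early return 0
def string2intLoop : List Char → Int → Int → Int
  | [], _, ret => ret
  | c :: cs, flag, ret =>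
    if c = '.' then string2intLoop cs 1 ret
    else
      match char2intA c with
      | none => 0
      | some k =>
        if flag = 0 then string2intLoop cs flag (ret * 10 + k)
        else string2intLoop cs flag ret

def string2int (str : String) : Int :=
  match str.toList with
  | [] => 0                                   -- len(str) == 0
  | c :: rest =>
    if rest = [] ∧ c = '0' then 0             -- len(str) == 1 and str[0] == '0'
    else if c = '.' then 0                    -- str[0] == '.'
    else string2intLoop (c :: rest) 0 0

-- ===== PORT B =====
def validCharB (c : Char) : Bool :=
  ['0','1','2','3','4','5','6','7','8','9','.'].contains c   -- c in '0123456789.'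

def string2int_alt (str : String) : Int :=
  match str.toList with
  | [] => 0                                   -- not str
  | c :: rest =>
    if c = '.' then 0                         -- str[0] == '.'
    else if (c :: rest).any (fun ch => !validCharB ch) then 0
    else ((c :: rest).takeWhile (fun ch => ch ≠ '.')).foldl   -- str.split('.', 1)[0]
           (fun v ch => 10 * v + ((ch.toNat : Int) - 48)) 0

-- ===== PRECONDITION & SPEC =====
def Spec_string2int (str : String) (out : Int) : Prop := out = string2int_alt str
instance (str : String) (out : Int) : Decidable (Spec_string2int str out) := by unfold Spec_string2int; infer_instance

-- ===== CLAIM (what is proved, stated in full; the proofs are below) =====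
def Claim_equal_string2int : Prop := ∀ (str : String), Dom_string2int str → Spec_string2int str (string2int str)

-- ===== LEMMAS AND PROOFS =====

lemma validCharB_cases (c : Char) (h : validCharB c = true) :
    c = '0' ∨ c = '1' ∨ c = '2' ∨ c = '3' ∨ c = '4' ∨ c = '5' ∨ c = '6' ∨ c = '7' ∨ c = '8' ∨ c = '9' ∨ c = '.' := by
  unfold validCharB at h
  rw [List.contains_iff_mem] at h
  simpa using h

lemma invalid_cases (c : Char) (h : validCharB c = false) :
    c ≠ '0' ∧ c ≠ '1' ∧ c ≠ '2' ∧ c ≠ '3' ∧ c ≠ '4' ∧ c ≠ '5' ∧ c ≠ '6' ∧ c ≠ '7' ∧ c ≠ '8' ∧ c ≠ '9' ∧ c ≠ '.' := by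
  unfold validCharB at h
  rw [← Bool.not_eq_true, List.contains_iff_mem] at h
  simpa using h

lemma char2intA_of_digit {c : Char} (hv : validCharB c = true) (hd : c ≠ '.') :
    char2intA c = some ((c.toNat : Int) - 48) := by
  rcases validCharB_cases c hv with h|h|h|h|h|h|h|h|h|h|h <;>
    first | (exact absurd h hd) | (subst h; rfl)

lemma char2intA_of_invalid {c : Char} (hv : validCharB c = false) :
    char2intA c = none := by
  obtain ⟨h0,h1,h2,h3,h4,h5,h6,h7,h8,h9,_⟩ := invalid_cases c hv
  unfold char2intA
  rw [if_neg]
  rintro (h|h|h|h|h|h|h|h|h|h) <;> simp_all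

-- an invalid character anywhere forces the loop to return 0, whatever the state
lemma loop_invalid (cs : List Char) (flag ret : Int)
    (h : ∃ c ∈ cs, validCharB c = false) :
    string2intLoop cs flag ret = 0 := by
  induction cs generalizing flag ret with
  | nil => rcases h with ⟨c, hc, _⟩; cases hc
  | cons c cs ih =>
    rcases h with ⟨d, hd, hdv⟩
    rcases List.mem_cons.mp hd with rfl | hmem
    · have hnd : d ≠ '.' := (invalid_cases d hdv).2.2.2.2.2.2.2.2.2.2
      simp [string2intLoop, hnd, char2intA_of_invalid hdv]
    · by_cases hc : c = '.'
      · subst hc; simp [string2intLoop]; exact ih 1 ret ⟨d, hmem, hdv⟩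
      · simp only [string2intLoop, if_neg hc]
        cases hk : char2intA c with
        | none => simp
        | some k =>
          simp only
          split <;> exact ih _ _ ⟨d, hmem, hdv⟩

-- once the flag is set, valid characters leave ret untouched
lemma loop_flag_one (cs : List Char) (ret : Int)
    (h : ∀ c ∈ cs, validCharB c = true) :
    string2intLoop cs 1 ret = ret := by
  induction cs generalizing ret with
  | nil => rfl
  | cons c cs ih =>
    have hc := h c (List.mem_cons_self ..)
    have hcs : ∀ c ∈ cs, validCharB c = true := fun d hd => h d (List.mem_cons_of_mem _ hd)
    by_cases hdot : c = '.'
    · subst hdot; simp [string2intLoop]; exact ih ret hcs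
    · rw [string2intLoop, if_neg hdot, char2intA_of_digit hc hdot]
      simp only [show (1 : Int) ≠ 0 by decide, if_false]
      exact ih ret hcs

-- with flag 0, the loop folds the digit prefix before the first '.'
lemma loop_flag_zero (cs : List Char) (ret : Int)
    (h : ∀ c ∈ cs, validCharB c = true) :
    string2intLoop cs 0 ret =
      (cs.takeWhile (fun ch => ch ≠ '.')).foldl
        (fun v ch => 10 * v + ((ch.toNat : Int) - 48)) ret := by
  induction cs generalizing ret with
  | nil => rfl
  | cons c cs ih =>
    have hc := h c (List.mem_cons_self ..)
    have hcs : ∀ c ∈ cs, validCharB c = true := fun d hd => h d (List.mem_cons_of_mem _ hd)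
    by_cases hdot : c = '.'
    · subst hdot
      simp only [List.takeWhile, decide_not]
      simp [string2intLoop]
      exact loop_flag_one cs ret hcs
    · rw [string2intLoop, if_neg hdot, char2intA_of_digit hc hdot]
      simp only [if_pos rfl]
      rw [show ret * 10 + ((c.toNat : Int) - 48) = 10 * ret + ((c.toNat : Int) - 48) by ring,
        ih _ hcs]
      simp [List.takeWhile, hdot]

-- ===== VERDICT (by name: the statement is the Claim_ definition above) =====
theorem string2int_spec : Claim_equal_string2int := by
  intro str _
  unfold Spec_string2int string2int string2int_alt
  cases hls : str.toList with
  | nil => rfl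
  | cons c rest =>
    by_cases hdot : c = '.'
    · subst hdot; simp
    · simp only [hdot, if_false]
      by_cases hinv : (c :: rest).any (fun ch => !validCharB ch)
      · -- some character is invalid: both return 0
        have hex : ∃ d ∈ c :: rest, validCharB d = false := by
          rcases List.any_eq_true.mp hinv with ⟨d, hd, hdv⟩
          exact ⟨d, hd, by simpa using hdv⟩
        by_cases hz : rest = [] ∧ c = '0'
        · exfalso
          rcases hex with ⟨d, hd, hdv⟩
          rcases hz with ⟨h1, h2⟩
          subst h1 h2
          simp at hd
          subst hd
          simp [validCharB] at hdv
        · simp only [if_neg hz, hinv, if_true]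
          exact loop_invalid _ 0 0 hex
      · -- all characters valid: both fold the prefix before the first '.'
        have hall : ∀ d ∈ c :: rest, validCharB d = true := by
          intro d hd
          by_contra hne
          exact hinv (List.any_eq_true.mpr ⟨d, hd, by simpa using hne⟩)
        have hB : (if (c :: rest).any (fun ch => !validCharB ch) then (0 : Int)
            else ((c :: rest).takeWhile (fun ch => ch ≠ '.')).foldl
              (fun v ch => 10 * v + ((ch.toNat : Int) - 48)) 0) =
            ((c :: rest).takeWhile (fun ch => ch ≠ '.')).foldl
              (fun v ch => 10 * v + ((ch.toNat : Int) - 48)) 0 := by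
          simp [hinv]
        rw [hB]
        by_cases hz : rest = [] ∧ c = '0'
        · rcases hz with ⟨h1, h2⟩; subst h1 h2; decide
        · rw [if_neg hz]
          exact loop_flag_zero _ 0 hall
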